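-- pv_equiv track=rewrite | github.com/rawbby/tinape | core/util/gen_macro.py | generate_for_each
-- ===== SOURCE A (Python) =====
-- def generate_for_each(n):
--     lines = []
--     lines.append('#define FOR_EACH_0(F,...)')
--     for i in range(1, n + 1):
--         params = ','.join(['F'] + [f"x{j}" for j in range(i)] + ['...'])
--         expansion = ','.join([f"F(x{j})" for j in range(i)])
--         lines.append(f"#define FOR_EACH_{i}({params}){expansion}")
--     return '\n'.join(lines)
-- ===== SOURCE B (Python) =====
-- def generate_for_each(n):
--     out = '#define FOR_EACH_0(F,...)'
--     tail = ''
--     expansion = ''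
--     for i in range(1, n + 1):
--         x = f"x{i - 1}"
--         tail += ',' + x
--         if expansion:
--             expansion += ',F(' + x + ')'
--         else:
--             expansion = 'F(' + x + ')'
--         out += f"\n#define FOR_EACH_{i}(F{tail},...){expansion}"
--     return out
-- ===== Notes on version B (the rewrite author's own statement) =====
-- stated objective: alternative
-- what changed: Instead of rebuilding the parameter list and expansion from scratch with per-line range comprehensions and joins, B carries a running parameter tail and a running expansion string across iterations, appending one element per step and concatenating each finished line onto the output.
import Mathlib
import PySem

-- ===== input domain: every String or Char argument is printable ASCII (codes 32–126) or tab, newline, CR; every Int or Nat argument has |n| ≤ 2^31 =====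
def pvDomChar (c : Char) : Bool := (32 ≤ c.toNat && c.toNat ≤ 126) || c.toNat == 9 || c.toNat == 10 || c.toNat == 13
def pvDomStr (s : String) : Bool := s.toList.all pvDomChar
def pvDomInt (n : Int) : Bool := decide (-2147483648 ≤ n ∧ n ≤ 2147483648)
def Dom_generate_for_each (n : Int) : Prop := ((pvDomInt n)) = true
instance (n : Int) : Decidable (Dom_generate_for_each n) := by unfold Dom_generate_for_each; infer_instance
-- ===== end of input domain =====

-- B replaces A's per-line comprehensions and joins by two strings (parameter tail, expansion)
-- accumulated across iterations; objective: alternative decomposition (no join/comprehension per line).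

-- ===== PORT A =====
def generate_for_each (n : Int) : String :=
  let lines : List String := ["#define FOR_EACH_0(F,...)"]
  let lines := (PySem.List.pyRange 1 (n + 1)).foldl (fun lines i =>
    let params := PySem.Str.join "," (["F"] ++ (PySem.List.pyRange 0 i).map (fun j => "x" ++ PySem.Int.toStr j) ++ ["..."])
    let expansion := PySem.Str.join "," ((PySem.List.pyRange 0 i).map (fun j => "F(x" ++ PySem.Int.toStr j ++ ")"))
    lines ++ ["#define FOR_EACH_" ++ PySem.Int.toStr i ++ "(" ++ params ++ ")" ++ expansion]) lines
  PySem.Str.join "\n" lines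

-- ===== PORT B =====
def generate_for_each_alt (n : Int) : String :=
  let st := (PySem.List.pyRange 1 (n + 1)).foldl (fun (st : String × String × String) i =>
    let x := "x" ++ PySem.Int.toStr (i - 1)
    let tail := st.2.1 ++ "," ++ x
    let expansion := if st.2.2 == "" then "F(" ++ x ++ ")" else st.2.2 ++ ",F(" ++ x ++ ")"
    (st.1 ++ "\n#define FOR_EACH_" ++ PySem.Int.toStr i ++ "(F" ++ tail ++ ",...)" ++ expansion,
     tail, expansion))
    ("#define FOR_EACH_0(F,...)", "", "")
  st.1

-- ===== PRECONDITION & SPEC =====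
def Spec_generate_for_each (n : Int) (out : String) : Prop := out = generate_for_each_alt n
instance (n : Int) (out : String) : Decidable (Spec_generate_for_each n out) := by unfold Spec_generate_for_each; infer_instance

-- ===== CLAIM (what is proved, stated in full; the proofs are below) =====
def Claim_equal_generate_for_each : Prop := ∀ (n : Int), Dom_generate_for_each n → Spec_generate_for_each n (generate_for_each n)

-- ===== LEMMAS AND PROOFS =====

-- proof-side vocabulary
def xchars (k : Nat) : List Char := 'x' :: PySem.Int.toChars (k : Int)
def fexp (k : Nat) : List Char := "F(".toList ++ xchars k ++ [')']
def tailL : Nat → List Char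
  | 0 => []
  | m + 1 => tailL m ++ ',' :: xchars m
def expL : Nat → List Char
  | 0 => []
  | m + 1 => if m = 0 then fexp 0 else expL m ++ ',' :: fexp m
def alineL (k : Nat) : List Char :=
  "#define FOR_EACH_".toList ++ PySem.Int.toChars (1 + (k : Int)) ++
    "(F".toList ++ tailL (k + 1) ++ ",...)".toList ++ expL (k + 1)
def outL : Nat → List Char
  | 0 => "#define FOR_EACH_0(F,...)".toList
  | m + 1 => outL m ++ '\n' :: alineL m

theorem join_cons_flat (sep x : List Char) (l : List (List Char)) :
    PySem.Chars.join sep (x :: l) = x ++ l.flatMap (fun y => sep ++ y) := by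
  induction l generalizing x with
  | nil => simp [PySem.Chars.join_singleton]
  | cons a l ih =>
      rw [PySem.Chars.join_cons_cons, ih]
      simp [List.flatMap_cons, List.append_assoc]

theorem join_append_singleton (sep y : List Char) (l : List (List Char)) :
    PySem.Chars.join sep (l ++ [y]) =
      if l = [] then y else PySem.Chars.join sep l ++ sep ++ y := by
  induction l with
  | nil => simp [PySem.Chars.join_singleton]
  | cons a l ih =>
      cases l with
      | nil => simp [PySem.Chars.join_cons_cons, PySem.Chars.join_singleton]
      | cons b l' =>
          simp only [List.cons_append] at ih ⊢
          rw [PySem.Chars.join_cons_cons, ih]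
          simp [PySem.Chars.join_cons_cons, List.append_assoc]

theorem tailL_eq (m : Nat) :
    tailL m = (List.range m).flatMap (fun k => ',' :: xchars k) := by
  induction m with
  | zero => simp [tailL]
  | succ m ih => rw [List.range_succ]; simp [tailL, ih]

theorem expL_eq (m : Nat) :
    expL m = PySem.Chars.join [','] ((List.range m).map fexp) := by
  induction m with
  | zero => simp [expL, PySem.Chars.join_nil]
  | succ m ih =>
      rw [List.range_succ, List.map_append, List.map_singleton, join_append_singleton]
      cases m with
      | zero => simp [expL]
      | succ m' =>
          rw [if_neg (by simp), expL, if_neg (by omega), ih]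
          simp [List.append_assoc]

theorem expL_succ_ne_nil (m : Nat) : expL (m + 1) ≠ [] := by
  cases m with
  | zero => simp [expL, fexp]
  | succ m' => simp [expL]

theorem outL_eq (m : Nat) :
    outL m = "#define FOR_EACH_0(F,...)".toList ++
      (List.range m).flatMap (fun k => '\n' :: alineL k) := by
  induction m with
  | zero => simp [outL]
  | succ m ih => rw [List.range_succ]; simp [outL, ih]

-- A's line at i = 1 + k, as a list of characters
theorem aline_A (k : Nat) :
    ("#define FOR_EACH_" ++ PySem.Int.toStr (1 + (k : Int)) ++ "(" ++
      PySem.Str.join "," ("F" :: (PySem.List.pyRange 0 (1 + (k : Int))).map (fun j => "x" ++ PySem.Int.toStr j) ++ ["..."]) ++ ")" ++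
      PySem.Str.join "," ((PySem.List.pyRange 0 (1 + (k : Int))).map (fun j => "F(x" ++ PySem.Int.toStr j ++ ")"))).toList
    = alineL k := by
  have ht : ((1 : Int) + (k : Int)).toNat = k + 1 := by omega
  have hr : PySem.List.pyRange 0 (1 + (k : Int)) =
      List.map (fun t : Nat => (t : Int)) (List.range (k + 1)) := by
    rw [PySem.List.pyRange_zero, ht]
  rw [alineL, tailL_eq, expL_eq]
  simp only [String.toList_append, PySem.Str.toList_join, hr, List.map_map, List.map_append,
    List.map_cons, List.map_nil, Function.comp_def, String.toList_append, PySem.Int.toList_toStr]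
  have hc : ",".toList = [','] := rfl
  simp only [List.cons_append, hc]
  rw [join_cons_flat, List.flatMap_append]
  rcases k with _ | k' <;>
    simp [xchars, fexp, List.append_assoc, List.flatMap_cons,
      join_cons_flat, List.flatMap_map]
  all_goals
    exact congrArg _ (List.map_congr_left (fun t _ => by simp [fexp, xchars]))

theorem A_toList (n : Int) : (generate_for_each n).toList = outL n.toNat := by
  simp only [generate_for_each]
  rw [PySem.List.pyRange_one, List.foldl_map, PySem.List.foldl_append_singleton_eq_map]
  have hn : (n + 1 - 1).toNat = n.toNat := by omega
  rw [hn, outL_eq, PySem.Str.toList_join]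
  simp only [List.singleton_append, List.map_map, List.map_cons,
    Function.comp_def]
  rw [join_cons_flat]
  congr 1
  rw [List.flatMap_map]
  apply List.flatMap_congr
  intro k _
  rw [aline_A k]
  rfl

-- B's loop body at i = 1 + k (the composition produced by List.foldl_map)
def bstep (st : String × String × String) (k : Nat) : String × String × String :=
  let x := "x" ++ PySem.Int.toStr (1 + (k : Int) - 1)
  let tail := st.2.1 ++ "," ++ x
  let expansion := if st.2.2 == "" then "F(" ++ x ++ ")" else st.2.2 ++ ",F(" ++ x ++ ")"
  (st.1 ++ "\n#define FOR_EACH_" ++ PySem.Int.toStr (1 + (k : Int)) ++ "(F" ++ tail ++ ",...)" ++ expansion,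
   tail, expansion)

theorem binv (m : Nat) :
    (((List.range m).foldl bstep ("#define FOR_EACH_0(F,...)", "", "")).1.toList = outL m) ∧
    (((List.range m).foldl bstep ("#define FOR_EACH_0(F,...)", "", "")).2.1.toList = tailL m) ∧
    (((List.range m).foldl bstep ("#define FOR_EACH_0(F,...)", "", "")).2.2.toList = expL m) := by
  induction m with
  | zero => refine ⟨rfl, rfl, rfl⟩
  | succ m ih =>
      obtain ⟨h1, h2, h3⟩ := ih
      rw [List.range_succ, List.foldl_append, List.foldl_cons, List.foldl_nil]
      set r := (List.range m).foldl bstep ("#define FOR_EACH_0(F,...)", "", "") with hr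
      have hx : (1 + (m : Int) - 1) = (m : Int) := by omega
      by_cases hm : m = 0
      · have hr2 : (r.2.2 == "") = true := by
          rw [beq_iff_eq, ← String.toList_inj, h3, hm]
          rfl
        subst hm
        refine ⟨?_, ?_, ?_⟩ <;>
          simp [bstep, hr2, h1, h2, outL, tailL, expL, alineL, xchars, fexp,
            PySem.Int.toList_toStr, List.append_assoc]
      · obtain ⟨m', rfl⟩ : ∃ m', m = m' + 1 := ⟨m - 1, by omega⟩
        have hr2 : (r.2.2 == "") = false := by
          apply beq_false_of_ne
          intro h
          apply expL_succ_ne_nil m'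
          rw [← h3, h]
          rfl
        refine ⟨?_, ?_, ?_⟩ <;>
          simp [bstep, hr2, h1, h2, h3, outL, tailL, expL, alineL, xchars, fexp,
            PySem.Int.toList_toStr, List.append_assoc]

theorem B_toList (n : Int) : (generate_for_each_alt n).toList = outL n.toNat := by
  simp only [generate_for_each_alt]
  rw [PySem.List.pyRange_one, List.foldl_map]
  have hn : (n + 1 - 1).toNat = n.toNat := by omega
  rw [hn]
  exact (binv n.toNat).1

-- ===== VERDICT (by name: the statement is the Claim_ definition above) =====
theorem generate_for_each_spec : Claim_equal_generate_for_each := by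
  intro n _
  unfold Spec_generate_for_each
  rw [← String.toList_inj, A_toList, B_toList]
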